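-- pv_equiv track=rewrite | github.com/yannl35133/sslib | ssrando.py | get_zones_and_max_location_name_len
-- ===== SOURCE A (Python) =====
-- from collections import OrderedDict
--
-- def get_zones_and_max_location_name_len(locations):
--     zones = OrderedDict()
--     max_location_name_length = 0
--     for location_name in locations:
--         zone_name, specific_location_name = (
--             location_name.split(" - ", 1)
--             if " - " in location_name
--             else ("", location_name)
--         )
--
--         if zone_name not in zones:
--             zones[zone_name] = []
--         zones[zone_name].append((location_name, specific_location_name))
--
--         if len(specific_location_name) > max_location_name_length:
--             max_location_name_length = len(specific_location_name)
--
--     return (zones, max_location_name_length)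
-- ===== SOURCE B (Python) =====
-- from collections import OrderedDict
--
-- def get_zones_and_max_location_name_len(locations):
--     def zone_spec(name):
--         if " - " in name:
--             zone, spec = name.split(" - ", 1)
--             return zone, spec
--         return "", name
--
--     keyed = [(zone_spec(name), name) for name in locations]
--     zones = OrderedDict(
--         (zone, [(name, spec) for ((z, spec), name) in keyed if z == zone])
--         for zone in OrderedDict.fromkeys(z for (z, _), _ in keyed)
--     )
--     max_len = max((len(spec) for (_, spec), _ in keyed), default=0)
--     return zones, max_len
-- ===== Notes on version B (the rewrite author's own statement) =====
-- stated objective: alternative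
-- what changed: A's single loop that incrementally grows an OrderedDict while tracking a running max is replaced by a map of (zone, specific) splits, an OrderedDict built from the deduplicated zone keys with a per-zone filter comprehension, and the max computed in a separate pass with max(..., default=0).
import Mathlib
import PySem

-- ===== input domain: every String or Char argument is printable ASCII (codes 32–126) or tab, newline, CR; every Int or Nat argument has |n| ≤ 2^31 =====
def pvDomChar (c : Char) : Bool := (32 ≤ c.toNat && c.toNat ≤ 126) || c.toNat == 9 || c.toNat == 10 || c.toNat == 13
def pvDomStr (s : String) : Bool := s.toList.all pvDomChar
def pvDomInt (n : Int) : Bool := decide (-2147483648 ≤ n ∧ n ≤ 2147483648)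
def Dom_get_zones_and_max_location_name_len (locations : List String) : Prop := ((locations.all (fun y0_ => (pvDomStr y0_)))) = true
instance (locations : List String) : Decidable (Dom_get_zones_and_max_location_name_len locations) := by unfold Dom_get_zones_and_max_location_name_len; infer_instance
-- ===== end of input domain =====

-- B replaces A's single combined loop (incremental dict + running max) by a dedup-of-zone-keys
-- + per-zone filter comprehension, with the max computed in a separate pass; alternative, not faster.

-- the zone/specific split both Pythons perform on each name:
-- ("", name) when " - " is absent, else name.split(" - ", 1)
def pvZoneSpec (name : String) : String × String :=
  if PySem.Str.isIn " - " name then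
    match PySem.Str.splitMax? name " - " 1 with
    | some (z :: s :: _) => (z, s)
    | _ => ("", name)  -- unreachable: the separator occurs, so the split has two pieces
  else ("", name)

-- ===== PORT A =====
def get_zones_and_max_location_name_len (locations : List String) : (List (String × List (String × String))) × Int :=
  let st := locations.foldl
    (fun (st : PySem.Dict String (List (String × String)) × Int) location_name =>
      let zs := pvZoneSpec location_name
      let zones := if st.1.contains zs.1 then st.1 else st.1.insert zs.1 []
      let zones := zones.insert zs.1 (zones.getD zs.1 [] ++ [(location_name, zs.2)])
      let m := if PySem.Str.len zs.2 > st.2 then PySem.Str.len zs.2 else st.2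
      (zones, m))
    (PySem.Dict.empty, 0)
  (st.1.items, st.2)

-- ===== PORT B =====
def get_zones_and_max_location_name_len_alt (locations : List String) : (List (String × List (String × String))) × Int :=
  let keyed := locations.map (fun name => (pvZoneSpec name, name))
  let zones := (PySem.List.dedup (keyed.map (fun p => p.1.1))).map
      (fun zone => (zone, (keyed.filter (fun p => p.1.1 == zone)).map (fun p => (p.2, p.1.2))))
  let maxLen := PySem.List.maxD (keyed.map (fun p => PySem.Str.len p.1.2)) (fun x => x) 0
  (zones, maxLen)

-- ===== PRECONDITION & SPEC =====
def Spec_get_zones_and_max_location_name_len (locations : List String) (out : (List (String × List (String × String))) × Int) : Prop := out = get_zones_and_max_location_name_len_alt locations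
instance (locations : List String) (out : (List (String × List (String × String))) × Int) : Decidable (Spec_get_zones_and_max_location_name_len locations out) := by unfold Spec_get_zones_and_max_location_name_len; infer_instance

-- ===== CLAIM (what is proved, stated in full; the proofs are below) =====
def Claim_equal_get_zones_and_max_location_name_len : Prop := ∀ (locations : List String), Dom_get_zones_and_max_location_name_len locations → Spec_get_zones_and_max_location_name_len locations (get_zones_and_max_location_name_len locations)

-- ===== LEMMAS AND PROOFS =====

-- A's dict update (membership check + append) is exactly a modify-with-default
lemma pvDictStep_eq_modify (d : PySem.Dict String (List (String × String)))
    (k : String) (e : String × String) :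
    ((if d.contains k then d else d.insert k []).insert k
      ((if d.contains k then d else d.insert k []).getD k [] ++ [e]))
    = d.modify k [] (· ++ [e]) := by
  by_cases h : d.contains k
  · simp [h, PySem.Dict.modify]
  · simp only [h, Bool.false_eq_true, ite_false]
    rw [PySem.Dict.getD_insert_self, PySem.Dict.insert_insert_self, PySem.Dict.modify,
      PySem.Dict.getD_of_not_contains _ _ (by simpa using h)]

-- max? on a nonempty list is a fold carrying a `some` accumulator
lemma pvMax?_cons (x : Int) (xs : List Int) :
    PySem.List.max? (x :: xs) (fun y => y)
    = xs.foldl (fun acc n => match acc with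
        | none => some n
        | some m => if m < n then some n else some m) (some x) := by
  unfold PySem.List.max?
  rw [List.foldl_cons]
  congr 1
  · funext acc n; cases acc <;> rfl

-- carrying a `some` accumulator through that fold is A's running-max loop
lemma pvMaxFold_some (ls : List Int) (a : Int) :
    ls.foldl
      (fun acc x => match acc with
        | none => some x
        | some m => if m < x then some x else some m) (some a)
    = some (ls.foldl (fun m x => if x > m then x else m) a) := by
  induction ls generalizing a with
  | nil => rfl
  | cons x xs ih =>
    simp only [List.foldl_cons]
    have hstep : (if a < x then some x else some a) = some (if x > a then x else a) := by
      split_ifs <;> rfl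
    rw [hstep]
    exact ih _

-- A's running max from 0 equals max(…, default=0) for nonnegative entries
lemma pvMaxFold_eq_maxD (ls : List Int) (h : ∀ x ∈ ls, 0 ≤ x) :
    ls.foldl (fun m x => if x > m then x else m) 0
    = PySem.List.maxD ls (fun x => x) 0 := by
  cases ls with
  | nil => rfl
  | cons x xs =>
    have hx : (if x > (0 : Int) then x else 0) = x := by
      have := h x (List.mem_cons_self)
      split_ifs <;> omega
    simp only [PySem.List.maxD, pvMax?_cons, pvMaxFold_some, List.foldl_cons, hx,
      Option.getD_some]

-- ===== VERDICT (by name: the statement is the Claim_ definition above) =====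
theorem get_zones_and_max_location_name_len_spec : Claim_equal_get_zones_and_max_location_name_len := by
  intro locations _
  show _ = _
  unfold get_zones_and_max_location_name_len get_zones_and_max_location_name_len_alt
  simp only [pvDictStep_eq_modify]
  rw [PySem.List.foldl_prod_mk
    (f := fun (d : PySem.Dict String (List (String × String))) location_name =>
      d.modify (pvZoneSpec location_name).1 [] (· ++ [(location_name, (pvZoneSpec location_name).2)]))
    (g := fun (m : Int) location_name =>
      if PySem.Str.len (pvZoneSpec location_name).2 > m then PySem.Str.len (pvZoneSpec location_name).2 else m)]
  refine Prod.ext ?_ ?_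
  · -- the grouped-dict component
    have hfold : locations.foldl
        (fun (d : PySem.Dict String (List (String × String))) name =>
          d.modify (pvZoneSpec name).1 [] (· ++ [(name, (pvZoneSpec name).2)]))
        PySem.Dict.empty
      = (locations.map (fun name => ((pvZoneSpec name).1, (name, (pvZoneSpec name).2)))).foldl
        (fun d p => d.modify p.1 [] (· ++ [p.2])) PySem.Dict.empty := by
      rw [List.foldl_map]
    show (List.foldl _ PySem.Dict.empty locations).items = _
    rw [hfold]
    have hnd : ((locations.map (fun name => ((pvZoneSpec name).1, (name, (pvZoneSpec name).2)))).foldl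
        (fun d p => d.modify p.1 [] (· ++ [p.2])) PySem.Dict.empty).keys.Nodup :=
      PySem.Dict.nodup_keys_foldl_modify_key _ Prod.fst [] (fun _ p => (· ++ [p.2])) _ (by simp)
    rw [PySem.Dict.items_eq_map_keys _ hnd []]
    rw [PySem.Dict.keys_foldl_modify_key _ Prod.fst [] (fun _ p => (· ++ [p.2]))]
    simp only [PySem.Dict.getD_foldl_modify_append, PySem.Dict.getD_empty, PySem.Dict.keys_empty,
      PySem.Set.update_nil_left, PySem.List.dedup, List.map_map, List.filter_map,
      Function.comp_def, List.nil_append]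
  · -- the max component
    show List.foldl _ 0 locations = PySem.List.maxD _ _ _
    rw [show (locations.map (fun name => (pvZoneSpec name, name))).map
          (fun p => PySem.Str.len p.1.2)
        = locations.map (fun name => PySem.Str.len (pvZoneSpec name).2) by
      rw [List.map_map]; rfl]
    rw [← pvMaxFold_eq_maxD _ (by
      intro x hx
      simp only [List.mem_map] at hx
      obtain ⟨n, _, rfl⟩ := hx
      simp [PySem.Str.len_eq])]
    rw [List.foldl_map]
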